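-- pv_equiv track=rewrite | github.com/ben5736/Algorithms | python/problems/sfo.py | findLowMetric
-- ===== SOURCE A (Python) =====
-- def findLowMetric(distances, matrix):
--   low_metric = None
--   low_metric_modes = []
--
--   for mode, distance in distances.items():
--     total_metric = distance * matrix[mode]
--     if low_metric is None or total_metric < low_metric:
--       low_metric = total_metric
--       low_metric_modes = [mode]
--     elif total_metric == low_metric:
--       low_metric_modes.append(mode)
--
--   return low_metric_modes
-- ===== SOURCE B (Python) =====
-- def findLowMetric(distances, matrix):
--   if not distances:
--     return []
--   metrics = {mode: distance * matrix[mode] for mode, distance in distances.items()}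
--   lowest = min(metrics.values())
--   return [mode for mode, metric in metrics.items() if metric == lowest]
-- ===== Notes on version B (the rewrite author's own statement) =====
-- stated objective: simpler
-- what changed: Replaces A's fused single-pass min-with-tie tracking (optional running minimum plus a rebuilt/appended mode list) by a table-build-then-filter decomposition: build the metrics table, take min of its values, then filter the modes attaining it.
import Mathlib
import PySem

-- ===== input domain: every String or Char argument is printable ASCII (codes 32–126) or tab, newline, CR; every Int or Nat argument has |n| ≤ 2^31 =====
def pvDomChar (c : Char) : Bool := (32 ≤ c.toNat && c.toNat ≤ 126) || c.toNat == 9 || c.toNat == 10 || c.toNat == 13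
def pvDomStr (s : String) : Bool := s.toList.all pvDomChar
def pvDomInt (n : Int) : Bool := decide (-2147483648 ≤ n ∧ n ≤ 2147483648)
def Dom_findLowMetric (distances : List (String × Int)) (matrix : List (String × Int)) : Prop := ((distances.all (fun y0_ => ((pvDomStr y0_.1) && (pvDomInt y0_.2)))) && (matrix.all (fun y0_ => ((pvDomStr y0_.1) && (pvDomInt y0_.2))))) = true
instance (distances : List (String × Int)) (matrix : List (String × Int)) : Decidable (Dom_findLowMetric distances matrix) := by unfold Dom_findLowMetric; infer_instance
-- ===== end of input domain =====

-- B replaces A's fused single-pass min-with-tie tracking by a simpler build-metrics-table,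
-- take min, then filter decomposition; equivalence of the return values is proved below.


-- shared primitive: matrix[mode] for a Python dict given as an association list
-- (first match; Pre_ guarantees the key is present, so the KeyError default 0 is never the value used)
def dictGet (matrix : List (String × Int)) (k : String) : Int :=
  ((PySem.Dict.mk matrix).get? k).getD 0

-- ===== PORT A =====
-- the for-loop over distances.items() with state (low_metric, low_metric_modes)
def findLowMetricLoop (matrix : List (String × Int)) :
    List (String × Int) → Option Int → List String → List String
  | [], _, modes => modes
  | (mode, distance) :: rest, low, modes =>
    let t := distance * dictGet matrix mode
    match low with
    | none => findLowMetricLoop matrix rest (some t) [mode]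
    | some l =>
      if t < l then findLowMetricLoop matrix rest (some t) [mode]
      else if t = l then findLowMetricLoop matrix rest (some l) (modes ++ [mode])
      else findLowMetricLoop matrix rest (some l) modes

def findLowMetric (distances : List (String × Int)) (matrix : List (String × Int)) : List String :=
  findLowMetricLoop matrix distances none []

-- ===== PORT B =====
def findLowMetric_alt (distances : List (String × Int)) (matrix : List (String × Int)) : List String :=
  match distances with
  | [] => []
  | _ =>
    let metrics := distances.map (fun p => (p.1, p.2 * dictGet matrix p.1))
    let lowest := (PySem.List.min? (metrics.map Prod.snd) (fun v => v)).getD 0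
    (metrics.filter (fun p => p.2 == lowest)).map Prod.fst

-- ===== PRECONDITION & SPEC =====
-- Pre_: every mode of distances occurs in matrix (otherwise Python A raises KeyError), and the
-- two association lists have unique keys (they stand for Python dicts, whose keys are unique).
def Pre_findLowMetric (distances : List (String × Int)) (matrix : List (String × Int)) : Prop :=
  (distances.map Prod.fst).Nodup ∧ (matrix.map Prod.fst).Nodup ∧
  ∀ p ∈ distances, p.1 ∈ matrix.map Prod.fst
instance (distances : List (String × Int)) (matrix : List (String × Int)) : Decidable (Pre_findLowMetric distances matrix) := by unfold Pre_findLowMetric; infer_instance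

def pvWitness_findLowMetric : (List (String × Int)) × (List (String × Int)) :=
  ([("a", 2), ("b", 1)], [("a", 3), ("b", 6)])

def Spec_findLowMetric (distances : List (String × Int)) (matrix : List (String × Int)) (out : List String) : Prop := out = findLowMetric_alt distances matrix
instance (distances : List (String × Int)) (matrix : List (String × Int)) (out : List String) : Decidable (Spec_findLowMetric distances matrix out) := by unfold Spec_findLowMetric; infer_instance

-- ===== CLAIM (what is proved, stated in full; the proofs are below) =====
def Claim_equal_findLowMetric : Prop := ∀ (distances : List (String × Int)) (matrix : List (String × Int)), Dom_findLowMetric distances matrix → Pre_findLowMetric distances matrix → Spec_findLowMetric distances matrix (findLowMetric distances matrix)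

-- ===== LEMMAS AND PROOFS =====

-- B's result as a function of the already-built metrics table
def selectMin (metrics : List (String × Int)) : List String :=
  let lowest := (PySem.List.min? (metrics.map Prod.snd) (fun v => v)).getD 0
  (metrics.filter (fun p => p.2 == lowest)).map Prod.fst

lemma min?_append_single {ms : List Int} {l t : Int}
    (h : PySem.List.min? ms (fun v => v) = some l) :
    PySem.List.min? (ms ++ [t]) (fun v => v) = some (min l t) := by
  cases ms with
  | nil => simp [PySem.List.min?] at h
  | cons x xs =>
    rw [PySem.List.min?_id_cons] at h
    injection h with h
    show PySem.List.min? (x :: (xs ++ [t])) _ = _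
    rw [PySem.List.min?_id_cons, List.foldl_append]
    simp [h]

-- loop invariant: if l is the minimum of the metrics seen so far and modes are exactly the modes
-- attaining it, continuing the loop yields B's select-the-minima of the full metrics table
lemma loop_inv (matrix : List (String × Int)) :
    ∀ (rest : List (String × Int)) (ms : List (String × Int)) (l : Int),
      PySem.List.min? (ms.map Prod.snd) (fun v => v) = some l →
      findLowMetricLoop matrix rest (some l) ((ms.filter (fun p => p.2 == l)).map Prod.fst)
        = selectMin (ms ++ rest.map (fun p => (p.1, p.2 * dictGet matrix p.1))) := by
  intro rest
  induction rest with
  | nil =>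
    intro ms l h
    simp [findLowMetricLoop, selectMin, h]
  | cons hd tl ih =>
    intro ms l h
    obtain ⟨mode, d⟩ := hd
    set t := d * dictGet matrix mode with ht
    have hmin : PySem.List.min? ((ms ++ [(mode, t)]).map Prod.snd) (fun v => v) = some (min l t) := by
      rw [List.map_append]
      exact min?_append_single h
    have hassoc : ms ++ ((mode, d) :: tl).map (fun p => (p.1, p.2 * dictGet matrix p.1))
        = (ms ++ [(mode, t)]) ++ tl.map (fun p => (p.1, p.2 * dictGet matrix p.1)) := by
      simp [ht]
    rw [hassoc]
    by_cases hlt : t < l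
    · have hms : ms.filter (fun p => p.2 == t) = [] := by
        rw [List.filter_eq_nil_iff]
        intro p hp
        have : l ≤ p.2 := PySem.List.min?_isMin h p.2 (List.mem_map_of_mem hp)
        simp only [beq_iff_eq]
        omega
      have ih' := ih (ms ++ [(mode, t)]) t (by rw [hmin, min_eq_right hlt.le])
      simp only [findLowMetricLoop, ← ht]
      rw [if_pos hlt, ← ih', List.filter_append, hms]
      simp
    · have hminl : min l t = l := min_eq_left (by omega)
      have ihr := ih (ms ++ [(mode, t)]) l (by rw [hmin, hminl])
      by_cases heq : t = l
      · simp only [findLowMetricLoop, ← ht]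
        rw [if_neg hlt, if_pos heq, ← ihr, List.filter_append]
        simp [heq]
      · simp only [findLowMetricLoop, ← ht]
        rw [if_neg hlt, if_neg heq, ← ihr, List.filter_append]
        simp [heq]

-- ===== VERDICT (by name: the statement is the Claim_ definition above) =====
theorem findLowMetric_spec : Claim_equal_findLowMetric := by
  intro distances matrix _ _
  unfold Spec_findLowMetric
  cases distances with
  | nil => rfl
  | cons hd tl =>
    obtain ⟨mode, d⟩ := hd
    set t := d * dictGet matrix mode with ht
    have h1 : PySem.List.min? ([(mode, t)].map Prod.snd) (fun v => v) = some t := by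
      rw [List.map_singleton, PySem.List.min?_id_cons]; rfl
    have h2 := loop_inv matrix tl [(mode, t)] t h1
    have h3 : ([(mode, t)].filter (fun p => p.2 == t)).map Prod.fst = [mode] := by simp
    rw [h3] at h2
    show findLowMetricLoop matrix ((mode, d) :: tl) none [] = _
    simp only [findLowMetricLoop, ← ht]
    rw [h2]
    show selectMin _ = findLowMetric_alt ((mode, d) :: tl) matrix
    simp [findLowMetric_alt, selectMin, ht]
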